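-- pv_equiv track=rewrite | github.com/AmjadAlwadi/MoralEdit | visualize_metrics.py | generate_sentiment_table
-- ===== SOURCE A (Python) =====
-- def generate_sentiment_table(rows):
--     r'''
--     \begin{table}[h]
--     \centering
--     \small % Reduce font size to fit the table if needed
--     \resizebox{\textwidth}{!}{ % Scale the table to fit the page width if necessary
--     \begin{tabular}{l c cc ccc cc}
--     \toprule
--     \multirow{2}{*}{\textbf{Editor}} & \multicolumn{1}{c}{\textbf{Reliability } $\uparrow$} & \multicolumn{2}{c}{\textbf{Generalization} $\uparrow$} & \multicolumn{3}{c}{\textbf{Portability} $\uparrow$} & \multicolumn{2}{c}{\textbf{Locality} $\downarrow$} \\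
--     \cmidrule(lr){2-2} \cmidrule(lr){3-4} \cmidrule(lr){5-7} \cmidrule(lr){8-9}
--     & Prompt & Light & Significant & Synonym & One-hop & Two-hop &  Neighborhood & Distracting \\
--     \midrule
--     \multicolumn{9}{l}{GPT-2 XL} \\
--     \midrule
--     MEND & 65.1 & 100.0 & 98.8 & 87.9 & 46.6 & 2 & 1 & 3\\
--     \midrule
--     \multicolumn{9}{l}{GPT-J} \\
--     \midrule
--     FT & 25.5 & 100.0 & 99.9 & 96.6  & 71.0 & 2 & 1 & 3\\
--     \bottomrule
--     \end{tabular}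
--     }
--     \caption{Performance metrics for different editors across GPT-2 XL and GPT-J models, with standard deviations in parentheses.}
--     \label{tab:performance_metrics}
--     \end{table}
--     '''
--
--
--
--     # Define the LaTeX table header
--     latex_table = r"""
--     \begin{table}[h]
--     \centering
--     \small % Reduce font size to fit the table if needed
--     \resizebox{\textwidth}{!}{ % Scale the table to fit the page width if necessary
--     \begin{tabular}{l c cc ccc cc}
--     \toprule
--     \multirow{2}{*}{\textbf{Editor}} & \multicolumn{1}{c}{\textbf{Reliability} $\uparrow$} & \multicolumn{2}{c}{\textbf{Generalization} $\uparrow$} & \multicolumn{3}{c}{\textbf{Portability} $\uparrow$} & \multicolumn{2}{c}{\textbf{Locality} $\downarrow$} \\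
--     \cmidrule(lr){2-2} \cmidrule(lr){3-4} \cmidrule(lr){5-7} \cmidrule(lr){8-9}
--     & Prompt & Light & Significant & Synonym & One-hop & Two-hop & Neighborhood & Distracting \\
--     \midrule
--     """
--
--     # Keep track of the current model to group rows by model
--     current_model = None
--
--     # Iterate through each row in the input data
--     for row in rows:
--         model_name = row[0]  # First column is the model name
--         editor = row[1]      # Second column is the editor
--         metrics = row[2:]    # Remaining columns are the metric values
--
--         # If the model changes, add a model header (left-aligned)
--         if model_name != current_model:
--             if current_model is not None:  # Add a midrule before the new model (except for the first model)
--                 latex_table += r"\midrule" + "\n"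
--             latex_table += r"\multicolumn{9}{l}{" + model_name + r"} \\" + "\n"
--             latex_table += r"\midrule" + "\n"
--             current_model = model_name
--
--         # Add the row for the editor and its metrics
--         metrics_str = " & ".join(map(str, metrics))  # Convert metrics to strings and join with " & "
--         latex_table += f"{editor} & {metrics_str} \\\\\n"
--
--     # Close the table
--     latex_table += r"""\bottomrule
--     \end{tabular}
--     }
--     \caption{Performance metrics for different editors across models.}
--     \label{tab:performance_metrics}
--     \end{table}
--     """
--
--     return latex_table
-- ===== SOURCE B (Python) =====
-- from itertools import groupby
--
-- _HEADER = r"""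
--     \begin{table}[h]
--     \centering
--     \small % Reduce font size to fit the table if needed
--     \resizebox{\textwidth}{!}{ % Scale the table to fit the page width if necessary
--     \begin{tabular}{l c cc ccc cc}
--     \toprule
--     \multirow{2}{*}{\textbf{Editor}} & \multicolumn{1}{c}{\textbf{Reliability} $\uparrow$} & \multicolumn{2}{c}{\textbf{Generalization} $\uparrow$} & \multicolumn{3}{c}{\textbf{Portability} $\uparrow$} & \multicolumn{2}{c}{\textbf{Locality} $\downarrow$} \\
--     \cmidrule(lr){2-2} \cmidrule(lr){3-4} \cmidrule(lr){5-7} \cmidrule(lr){8-9}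
--     & Prompt & Light & Significant & Synonym & One-hop & Two-hop & Neighborhood & Distracting \\
--     \midrule
--     """
--
-- _FOOTER = r"""\bottomrule
--     \end{tabular}
--     }
--     \caption{Performance metrics for different editors across models.}
--     \label{tab:performance_metrics}
--     \end{table}
--     """
--
--
-- def _render_group(model, group):
--     # one model block: header line, midrule, then one line per editor row
--     lines = "".join(row[1] + " & " + " & ".join(map(str, row[2:])) + " \\\\\n" for row in group)
--     return "\\multicolumn{9}{l}{" + model + "} \\\\\n" + "\\midrule\n" + lines
--
--
-- def generate_sentiment_table(rows):
--     groups = [(model, list(group)) for model, group in groupby(rows, key=lambda r: r[0])]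
--     body = "\\midrule\n".join(_render_group(m, g) for m, g in groups)
--     return _HEADER + body + _FOOTER
-- ===== Notes on version B (the rewrite author's own statement) =====
-- stated objective: alternative
-- what changed: Replaces A's single stateful pass tracking current_model with an itertools.groupby two-level decomposition: rows are first grouped into consecutive runs per model, then each group is rendered as a block and the blocks are joined with \midrule.
import Mathlib
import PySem

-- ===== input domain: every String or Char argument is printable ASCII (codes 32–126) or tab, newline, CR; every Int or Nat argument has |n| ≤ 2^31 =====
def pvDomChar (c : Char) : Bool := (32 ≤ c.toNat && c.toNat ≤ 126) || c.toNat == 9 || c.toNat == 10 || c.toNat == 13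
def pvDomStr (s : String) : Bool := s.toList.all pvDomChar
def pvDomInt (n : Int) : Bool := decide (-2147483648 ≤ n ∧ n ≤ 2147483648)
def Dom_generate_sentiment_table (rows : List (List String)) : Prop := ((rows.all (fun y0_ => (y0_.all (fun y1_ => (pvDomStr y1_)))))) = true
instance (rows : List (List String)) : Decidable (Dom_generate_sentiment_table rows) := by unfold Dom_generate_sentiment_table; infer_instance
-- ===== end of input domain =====

-- B rebuilds the same LaTeX table by grouping consecutive rows per model (groupby) and
-- joining rendered blocks, instead of A's single stateful pass; objective: alternative decomposition.
-- ===== PORT A =====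
def pvHeaderA : String := "\n    \\begin{table}[h]\n    \\centering\n    \\small % Reduce font size to fit the table if needed\n    \\resizebox{\\textwidth}{!}{ % Scale the table to fit the page width if necessary\n    \\begin{tabular}{l c cc ccc cc}\n    \\toprule\n    \\multirow{2}{*}{\\textbf{Editor}} & \\multicolumn{1}{c}{\\textbf{Reliability} $\\uparrow$} & \\multicolumn{2}{c}{\\textbf{Generalization} $\\uparrow$} & \\multicolumn{3}{c}{\\textbf{Portability} $\\uparrow$} & \\multicolumn{2}{c}{\\textbf{Locality} $\\downarrow$} \\\\\n    \\cmidrule(lr){2-2} \\cmidrule(lr){3-4} \\cmidrule(lr){5-7} \\cmidrule(lr){8-9}\n    & Prompt & Light & Significant & Synonym & One-hop & Two-hop & Neighborhood & Distracting \\\\\n    \\midrule\n    "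

def pvFooterA : String := "\\bottomrule\n    \\end{tabular}\n    }\n    \\caption{Performance metrics for different editors across models.}\n    \\label{tab:performance_metrics}\n    \\end{table}\n    "

-- one iteration of A's for-loop over (current_model, latex_table)
def pvStepA (st : Option String × String) (row : List String) : Option String × String :=
  let model_name := (PySem.List.pyGet? row 0).getD ""   -- row[0]; in range on Pre_
  let editor := (PySem.List.pyGet? row 1).getD ""       -- row[1]; in range on Pre_
  let metrics := PySem.List.slice row (some 2) none     -- row[2:]
  let st :=
    if st.1 ≠ some model_name then
      (some model_name,
        st.2 ++ (if st.1 ≠ none then "\\midrule\n" else "")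
             ++ ("\\multicolumn{9}{l}{" ++ model_name ++ "} \\\\\n")
             ++ "\\midrule\n")
    else st
  let metrics_str := PySem.Str.join " & " metrics
  (st.1, st.2 ++ (editor ++ " & " ++ metrics_str ++ " \\\\\n"))

def generate_sentiment_table (rows : List (List String)) : String :=
  (rows.foldl pvStepA (none, pvHeaderA)).2 ++ pvFooterA

-- ===== PORT B =====
def pvHeaderB : String := "\n    \\begin{table}[h]\n    \\centering\n    \\small % Reduce font size to fit the table if needed\n    \\resizebox{\\textwidth}{!}{ % Scale the table to fit the page width if necessary\n    \\begin{tabular}{l c cc ccc cc}\n    \\toprule\n    \\multirow{2}{*}{\\textbf{Editor}} & \\multicolumn{1}{c}{\\textbf{Reliability} $\\uparrow$} & \\multicolumn{2}{c}{\\textbf{Generalization} $\\uparrow$} & \\multicolumn{3}{c}{\\textbf{Portability} $\\uparrow$} & \\multicolumn{2}{c}{\\textbf{Locality} $\\downarrow$} \\\\\n    \\cmidrule(lr){2-2} \\cmidrule(lr){3-4} \\cmidrule(lr){5-7} \\cmidrule(lr){8-9}\n    & Prompt & Light & Significant & Synonym & One-hop & Two-hop & Neighborhood & Distracting \\\\\n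    \\midrule\n    "

def pvFooterB : String := "\\bottomrule\n    \\end{tabular}\n    }\n    \\caption{Performance metrics for different editors across models.}\n    \\label{tab:performance_metrics}\n    \\end{table}\n    "

-- one editor line: row[1] + " & " + " & ".join(row[2:]) + " \\\\\n"
def pvLineB (row : List String) : String :=
  (PySem.List.pyGet? row 1).getD "" ++ " & "
    ++ PySem.Str.join " & " (PySem.List.slice row (some 2) none) ++ " \\\\\n"

-- _render_group: model header line, midrule, then the group's editor lines
def pvRenderGroupB (p : String × List (List String)) : String :=
  "\\multicolumn{9}{l}{" ++ p.1 ++ "} \\\\\n" ++ "\\midrule\n"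
    ++ PySem.Str.join "" (p.2.map pvLineB)

-- itertools.groupby(rows, key=lambda r: r[0]) as a list of (key, run) pairs
def pvRunsB : List (List String) → List (String × List (List String))
  | [] => []
  | r :: rs =>
    let k := (PySem.List.pyGet? r 0).getD ""
    match pvRunsB rs with
    | [] => [(k, [r])]
    | (k', g) :: gs => if k = k' then (k, r :: g) :: gs else (k, [r]) :: (k', g) :: gs

def generate_sentiment_table_alt (rows : List (List String)) : String :=
  pvHeaderB ++ PySem.Str.join "\\midrule\n" ((pvRunsB rows).map pvRenderGroupB) ++ pvFooterB

-- ===== PRECONDITION & SPEC =====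
-- Pre_ excludes exactly the inputs where the Python A raises IndexError: a row with
-- fewer than two entries (row[0]/row[1]); B raises there as well.
def Pre_generate_sentiment_table (rows : List (List String)) : Prop :=
  ∀ row ∈ rows, 2 ≤ row.length
instance (rows : List (List String)) : Decidable (Pre_generate_sentiment_table rows) := by
  unfold Pre_generate_sentiment_table; infer_instance
def pvWitness_generate_sentiment_table : List (List String) :=
  [["GPT-2 XL", "MEND", "65.1", "100.0"], ["GPT-J", "FT", "25.5", "99.9"]]
def Spec_generate_sentiment_table (rows : List (List String)) (out : String) : Prop := out = generate_sentiment_table_alt rows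
instance (rows : List (List String)) (out : String) : Decidable (Spec_generate_sentiment_table rows out) := by unfold Spec_generate_sentiment_table; infer_instance

-- ===== CLAIM (what is proved, stated in full; the proofs are below) =====
def Claim_equal_generate_sentiment_table : Prop := ∀ (rows : List (List String)), Dom_generate_sentiment_table rows → Pre_generate_sentiment_table rows → Spec_generate_sentiment_table rows (generate_sentiment_table rows)

-- ===== LEMMAS AND PROOFS =====
-- join facts specific to the separators B uses
theorem pvJoin_nil (sep : String) : PySem.Str.join sep [] = "" := by
  simp [PySem.Str.join, PySem.Chars.join, List.intercalate]

theorem pvJoin_cons_cons (sep x y : String) (ys : List String) :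
    PySem.Str.join sep (x :: y :: ys) = x ++ (sep ++ PySem.Str.join sep (y :: ys)) := by
  simp [PySem.Str.join, PySem.Chars.join, List.intercalate, String.ofList_append]

theorem pvJoin_singleton (sep x : String) : PySem.Str.join sep [x] = x := by
  simp [PySem.Str.join, PySem.Chars.join, List.intercalate]

theorem pvJoinEmpty_cons (x : String) (xs : List String) :
    PySem.Str.join "" (x :: xs) = x ++ PySem.Str.join "" xs := by
  cases xs with
  | nil => simp [pvJoin_singleton, pvJoin_nil]
  | cons y ys => rw [pvJoin_cons_cons]; simp

def pvKey (row : List String) : String := (PySem.List.pyGet? row 0).getD ""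

-- the text A's loop body appends for one row, given the current model
def pvChunk (cur : Option String) (row : List String) : String :=
  (if cur ≠ some (pvKey row) then
     (if cur ≠ none then "\\midrule\n" else "")
       ++ ("\\multicolumn{9}{l}{" ++ pvKey row ++ "} \\\\\n") ++ "\\midrule\n"
   else "") ++ pvLineB row

-- the suffix A's loop appends to the accumulator from state cur onwards
def pvSuffA : Option String → List (List String) → String
  | _, [] => ""
  | cur, row :: rest => pvChunk cur row ++ pvSuffA (some (pvKey row)) rest

-- B's rendering of the groups after the first, each preceded by a midrule
def pvTailR : List (String × List (List String)) → String
  | [] => ""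
  | p :: gs => "\\midrule\n" ++ (pvRenderGroupB p ++ pvTailR gs)

-- B's rendering of a group list when the model before it is m
def pvContB : String → List (String × List (List String)) → String
  | _, [] => ""
  | m, (k, g) :: gs =>
      if k = m then PySem.Str.join "" (g.map pvLineB) ++ pvTailR gs
      else "\\midrule\n" ++ (pvRenderGroupB (k, g) ++ pvTailR gs)

theorem pvStepA_eq (cur : Option String) (acc : String) (row : List String) :
    pvStepA (cur, acc) row = (some (pvKey row), acc ++ pvChunk cur row) := by
  unfold pvStepA pvChunk pvLineB pvKey
  by_cases h : cur = some ((PySem.List.pyGet? row 0).getD "") <;>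
    simp [h, String.append_assoc]

theorem pvFoldA_eq (rows : List (List String)) :
    ∀ (cur : Option String) (acc : String),
      (rows.foldl pvStepA (cur, acc)).2 = acc ++ pvSuffA cur rows := by
  induction rows with
  | nil => intro cur acc; simp [pvSuffA]
  | cons r rest ih =>
      intro cur acc
      simp only [List.foldl_cons, pvStepA_eq, pvSuffA, ih, String.append_assoc]

theorem pvSuffA_some (rows : List (List String)) :
    ∀ m : String, pvSuffA (some m) rows = pvContB m (pvRunsB rows) := by
  induction rows with
  | nil => intro m; simp [pvSuffA, pvRunsB, pvContB]
  | cons r rest ih =>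
      intro m
      simp only [pvSuffA, pvRunsB]
      rw [ih (pvKey r), show ((PySem.List.pyGet? r 0).getD "" : String) = pvKey r from rfl]
      rcases hrest : pvRunsB rest with _ | ⟨⟨k', g⟩, gs⟩
      · by_cases hm : m = pvKey r
        · subst hm; simp [pvChunk, pvContB, pvTailR, pvJoin_singleton]
        · simp [pvChunk, pvContB, pvTailR, pvRenderGroupB, hm, Ne.symm hm, pvJoin_singleton,
            String.append_assoc]
      · by_cases hk : pvKey r = k'
        · subst hk
          by_cases hm : m = pvKey r
          · subst hm
            simp [pvChunk, pvContB, pvJoinEmpty_cons, String.append_assoc]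
          · simp [pvChunk, pvContB, pvRenderGroupB, hm, Ne.symm hm, pvJoinEmpty_cons,
              String.append_assoc]
        · by_cases hm : m = pvKey r
          · subst hm
            simp [pvChunk, pvContB, pvTailR, pvRenderGroupB, hk, Ne.symm hk,
              pvJoin_singleton, String.append_assoc]
          · simp [pvChunk, pvContB, pvTailR, pvRenderGroupB, hk, Ne.symm hk, hm, Ne.symm hm,
              pvJoin_singleton, String.append_assoc]

theorem pvSuffA_none (rows : List (List String)) :
    pvSuffA none rows =
      match pvRunsB rows with
      | [] => ""
      | p :: gs => pvRenderGroupB p ++ pvTailR gs := by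
  cases rows with
  | nil => simp [pvSuffA, pvRunsB]
  | cons r rest =>
      simp only [pvSuffA, pvRunsB]
      rw [pvSuffA_some rest (pvKey r),
        show ((PySem.List.pyGet? r 0).getD "" : String) = pvKey r from rfl]
      rcases hrest : pvRunsB rest with _ | ⟨⟨k', g⟩, gs⟩
      · simp [pvChunk, pvContB, pvTailR, pvRenderGroupB, pvJoin_singleton, String.append_assoc]
      · by_cases hk : pvKey r = k'
        · subst hk
          simp [pvChunk, pvContB, pvRenderGroupB, pvJoinEmpty_cons, String.append_assoc]
        · simp [pvChunk, pvContB, pvTailR, pvRenderGroupB, hk, Ne.symm hk, pvJoin_singleton,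
            String.append_assoc]

theorem pvJoinM_eq (gs : List (String × List (List String))) :
    PySem.Str.join "\\midrule\n" (gs.map pvRenderGroupB) =
      match gs with
      | [] => ""
      | p :: gs' => pvRenderGroupB p ++ pvTailR gs' := by
  induction gs with
  | nil => simp [pvJoin_nil]
  | cons p gs ih =>
      cases gs with
      | nil => simp [pvJoin_singleton, pvTailR]
      | cons q qs =>
          simp only [List.map_cons] at ih ⊢
          rw [pvJoin_cons_cons, ih]
          simp [pvTailR]

-- ===== VERDICT (by name: the statement is the Claim_ definition above) =====
theorem generate_sentiment_table_spec : Claim_equal_generate_sentiment_table := by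
  intro rows _ _
  unfold Spec_generate_sentiment_table
  show generate_sentiment_table rows = generate_sentiment_table_alt rows
  rw [generate_sentiment_table, generate_sentiment_table_alt, pvFoldA_eq, pvSuffA_none,
    pvJoinM_eq]
  rfl
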